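-- pv_equiv track=rewrite | github.com/SeJohnEff/SimGUI | tests/test_audit_fixes.py | _make_eml_with_cards
-- ===== SOURCE A (Python) =====
-- def _make_eml_with_cards(count=3):
--     """Build a minimal sysmocol-style EML body."""
--     fields = ["IMSI", "ICCID", "ACC", "PIN1", "PUK1", "Ki", "OPC", "ADM1",
--               "KIC1", "KID1", "KIK1", "KIC2", "KID2", "KIK2"]
--     lines = [
--         "From: test@sysmocol.de",
--         "To: user@example.com",
--         "Subject: SIM Card Details",
--         "MIME-Version: 1.0",
--         "Content-Type: text/plain; charset=\"utf-8\"",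
--         "",
--         "Type: sysmoISIM-SJA5",
--         "",
--     ]
--     lines += fields + [""]
--     for i in range(count):
--         for f in fields:
--             if f == "IMSI":
--                 lines.append(f"99988{i:010d}")
--             elif f == "ICCID":
--                 lines.append(f"894944000001{i:06d}0")
--             elif f == "ADM1":
--                 lines.append("12345678")
--             elif f == "ACC":
--                 lines.append("0001")
--             elif f == "PIN1":
--                 lines.append("1234")
--             elif f == "PUK1":
--                 lines.append("12345678")
--             elif f in ("Ki", "OPC", "KIC1", "KID1", "KIK1",
--                        "KIC2", "KID2", "KIK2"):
--                 lines.append("AA" * 16)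
--             else:
--                 lines.append(f"{f}_val_{i}")
--         lines.append("")
--     return "\n".join(lines)
-- ===== SOURCE B (Python) =====
-- # Different decomposition: no per-field loop at all -- the 12 constant field
-- # values are pre-joined into one fixed block string, and each card is emitted
-- # as a single formatted chunk concatenated onto a fixed header string.
-- _A16 = "AA" * 16
--
-- _CONST_BLOCK = "\n".join(
--     ["0001", "1234", "12345678", _A16, _A16, "12345678"] + [_A16] * 6)
--
-- _FIELDS = ["IMSI", "ICCID", "ACC", "PIN1", "PUK1", "Ki", "OPC", "ADM1",
--            "KIC1", "KID1", "KIK1", "KIC2", "KID2", "KIK2"]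
--
-- _HEAD = "\n".join([
--     "From: test@sysmocol.de",
--     "To: user@example.com",
--     "Subject: SIM Card Details",
--     "MIME-Version: 1.0",
--     "Content-Type: text/plain; charset=\"utf-8\"",
--     "",
--     "Type: sysmoISIM-SJA5",
--     "",
-- ] + _FIELDS + [""])
--
--
-- def _make_eml_with_cards(count=3):
--     """Build a minimal sysmocol-style EML body."""
--     return _HEAD + "".join(
--         "\n99988%010d\n894944000001%06d0\n%s\n" % (i, i, _CONST_BLOCK)
--         for i in range(count))
-- ===== Notes on version B (the rewrite author's own statement) =====
-- stated objective: alternative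
-- what changed: B has no per-field loop or lines list at all: the constant field values are pre-joined once into a fixed block string and the fixed header is pre-joined once, then each card is emitted as a single formatted chunk (IMSI line, ICCID line, constant block) concatenated onto the header, instead of A's nested loops with an if/elif chain appending one line per field to a shared list that is joined at the end.
import Mathlib
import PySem

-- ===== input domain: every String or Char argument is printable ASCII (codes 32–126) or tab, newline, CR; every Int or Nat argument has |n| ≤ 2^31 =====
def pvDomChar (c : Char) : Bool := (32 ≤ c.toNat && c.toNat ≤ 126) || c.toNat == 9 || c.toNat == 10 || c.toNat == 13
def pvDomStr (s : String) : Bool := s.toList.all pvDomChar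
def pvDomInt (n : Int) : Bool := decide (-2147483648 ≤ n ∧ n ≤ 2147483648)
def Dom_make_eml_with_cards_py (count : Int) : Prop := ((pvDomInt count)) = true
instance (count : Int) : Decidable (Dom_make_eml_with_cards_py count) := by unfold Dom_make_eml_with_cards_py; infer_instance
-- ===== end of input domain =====

-- B drops A's per-field loop and lines list entirely: the constant field values are
-- pre-joined once into a fixed block and each card is one formatted chunk concatenated
-- onto a fixed pre-joined header (objective: alternative decomposition, same O(count)).

-- shared transliterations of the format expressions both Pythons contain
-- "AA" * 16 (string repetition, ported by hand; exact for a nonnegative literal count)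
def pyStrMul (s : String) (n : Nat) : String := (List.replicate n s).foldl (· ++ ·) ""
-- f"99988{i:010d}" / "99988%010d" % i  (zero-pad to width 10; exact for the i ≥ 0 produced by range)
def fmtIMSI (i : Int) : String := "99988" ++ PySem.Str.zfill (PySem.Int.toStr i) 10
-- f"894944000001{i:06d}0" / "894944000001%06d0" % i
def fmtICCID (i : Int) : String := "894944000001" ++ PySem.Str.zfill (PySem.Int.toStr i) 6 ++ "0"

-- the header literal both sources contain
def pvHeader : List String :=
  ["From: test@sysmocol.de",
   "To: user@example.com",
   "Subject: SIM Card Details",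
   "MIME-Version: 1.0",
   "Content-Type: text/plain; charset=\"utf-8\"",
   "",
   "Type: sysmoISIM-SJA5",
   ""]

-- ===== PORT A =====
def aFields : List String :=
  ["IMSI", "ICCID", "ACC", "PIN1", "PUK1", "Ki", "OPC", "ADM1",
   "KIC1", "KID1", "KIK1", "KIC2", "KID2", "KIK2"]

-- the body of A's inner loop: the if/elif chain, branches in A's order
def aValue (f : String) (i : Int) : String :=
  if f = "IMSI" then fmtIMSI i
  else if f = "ICCID" then fmtICCID i
  else if f = "ADM1" then "12345678"
  else if f = "ACC" then "0001"
  else if f = "PIN1" then "1234"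
  else if f = "PUK1" then "12345678"
  else if ["Ki", "OPC", "KIC1", "KID1", "KIK1", "KIC2", "KID2", "KIK2"].contains f
    then pyStrMul "AA" 16
  else f ++ "_val_" ++ PySem.Int.toStr i

def make_eml_with_cards_py (count : Int) : String :=
  let lines := pvHeader
  let lines := lines ++ aFields ++ [""]
  let lines := (PySem.List.pyRange 0 count 1).foldl
    (fun lines i =>
      (aFields.foldl (fun lines f => lines ++ [aValue f i]) lines) ++ [""])
    lines
  PySem.Str.join "\n" lines

-- ===== PORT B =====
def bA16 : String := pyStrMul "AA" 16

def bConstVals : List String :=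
  ["0001", "1234", "12345678", bA16, bA16, "12345678"] ++ List.replicate 6 bA16

def bConstBlock : String := PySem.Str.join "\n" bConstVals

def bFields : List String :=
  ["IMSI", "ICCID", "ACC", "PIN1", "PUK1", "Ki", "OPC", "ADM1",
   "KIC1", "KID1", "KIK1", "KIC2", "KID2", "KIK2"]

def bHead : String := PySem.Str.join "\n" (pvHeader ++ bFields ++ [""])

-- one card's chunk: "\n99988%010d\n894944000001%06d0\n%s\n" % (i, i, _CONST_BLOCK)
def bChunk (i : Int) : String :=
  "\n" ++ fmtIMSI i ++ "\n" ++ fmtICCID i ++ "\n" ++ bConstBlock ++ "\n"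

def make_eml_with_cards_py_alt (count : Int) : String :=
  bHead ++ PySem.Str.join "" ((PySem.List.pyRange 0 count 1).map bChunk)

-- ===== PRECONDITION & SPEC =====
def Spec_make_eml_with_cards_py (count : Int) (out : String) : Prop := out = make_eml_with_cards_py_alt count
instance (count : Int) (out : String) : Decidable (Spec_make_eml_with_cards_py count out) := by unfold Spec_make_eml_with_cards_py; infer_instance

-- ===== CLAIM (what is proved, stated in full; the proofs are below) =====
def Claim_equal_make_eml_with_cards_py : Prop := ∀ (count : Int), Dom_make_eml_with_cards_py count → Spec_make_eml_with_cards_py count (make_eml_with_cards_py count)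

-- ===== LEMMAS AND PROOFS =====

-- String-level facts about Python's sep.join, lifted from the PySem.Chars lemmas
lemma strJoin_cons_cons (sep a b : String) (l : List String) :
    PySem.Str.join sep (a :: b :: l) = a ++ sep ++ PySem.Str.join sep (b :: l) := by
  rw [← String.toList_inj]
  simp [PySem.Str.toList_join, PySem.Chars.join_cons_cons]

lemma strJoin_singleton (sep a : String) : PySem.Str.join sep [a] = a := by
  rw [← String.toList_inj]
  simp [PySem.Str.toList_join, PySem.Chars.join_singleton]

lemma strJoin_nil (sep : String) : PySem.Str.join sep [] = "" := by
  rw [← String.toList_inj]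
  simp [PySem.Str.toList_join, PySem.Chars.join_nil]

lemma strJoin_empty_cons (x : String) (l : List String) :
    PySem.Str.join "" (x :: l) = x ++ PySem.Str.join "" l := by
  cases l with
  | nil => simp [strJoin_singleton, strJoin_nil]
  | cons b t => rw [strJoin_cons_cons]; simp

lemma strJoin_append_cons (p : List String) (a : String) (q : List String) (hp : p ≠ []) :
    PySem.Str.join "\n" (p ++ a :: q)
      = PySem.Str.join "\n" p ++ "\n" ++ PySem.Str.join "\n" (a :: q) := by
  induction p with
  | nil => exact absurd rfl hp
  | cons x t ih =>
      cases t with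
      | nil => simp [strJoin_cons_cons, strJoin_singleton]
      | cons y s =>
          have h := ih (by simp)
          simp only [List.cons_append] at *
          rw [strJoin_cons_cons, h, strJoin_cons_cons]
          simp [String.append_assoc]

-- the 15 lines one card appends in A
def cardLines (i : Int) : List String :=
  fmtIMSI i :: fmtICCID i :: (bConstVals ++ [""])

-- A's inner if/elif chain over the literal field list yields exactly those values
lemma aMap (i : Int) :
    aFields.map (fun f => aValue f i) ++ [""] = cardLines i := by
  simp [aFields, aValue, cardLines, bConstVals, bA16, List.replicate]

-- A's outer loop appends one block per card
lemma outer_loop (l : List Int) (acc : List String) :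
    l.foldl (fun lines i =>
        (aFields.foldl (fun lines f => lines ++ [aValue f i]) lines) ++ [""]) acc
      = acc ++ l.flatMap cardLines := by
  induction l generalizing acc with
  | nil => simp
  | cons x xs ih =>
      rw [List.foldl_cons, ih, PySem.List.foldl_append_singleton_eq_map]
      simp [← aMap x, List.append_assoc]

-- joining one card's lines after a nonempty prefix produces B's chunk
lemma join_block (i : Int) (p : List String) (hp : p ≠ []) :
    PySem.Str.join "\n" (p ++ cardLines i) = PySem.Str.join "\n" p ++ bChunk i := by
  have hc : PySem.Str.join "\n" (cardLines i)
      = fmtIMSI i ++ "\n" ++ fmtICCID i ++ "\n" ++ bConstBlock ++ "\n" := by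
    simp [cardLines, bConstVals, bConstBlock, strJoin_cons_cons, strJoin_singleton,
      List.replicate, String.append_assoc]
  rw [show p ++ cardLines i = p ++ (fmtIMSI i :: (fmtICCID i :: (bConstVals ++ [""]))) from rfl,
    strJoin_append_cons p _ _ hp]
  rw [show (fmtIMSI i :: (fmtICCID i :: (bConstVals ++ [""]))) = cardLines i from rfl, hc]
  simp [bChunk, String.append_assoc]

-- splitting the join: prefix, then one chunk per card
lemma main_split (l : List Int) (p : List String) (hp : p ≠ []) :
    PySem.Str.join "\n" (p ++ l.flatMap cardLines)
      = PySem.Str.join "\n" p ++ PySem.Str.join "" (l.map bChunk) := by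
  induction l generalizing p with
  | nil => simp [strJoin_nil]
  | cons i t ih =>
      have hsh : p ++ (i :: t).flatMap cardLines
          = (p ++ cardLines i) ++ t.flatMap cardLines := by
        simp [List.append_assoc]
      have hne : p ++ cardLines i ≠ [] := by
        intro h; exact hp (List.append_eq_nil_iff.mp h).1
      rw [hsh, ih _ hne, join_block i p hp, List.map_cons, strJoin_empty_cons,
        String.append_assoc]

-- ===== VERDICT (by name: the statement is the Claim_ definition above) =====
theorem make_eml_with_cards_py_spec : Claim_equal_make_eml_with_cards_py := by
  intro count _
  unfold Spec_make_eml_with_cards_py make_eml_with_cards_py make_eml_with_cards_py_alt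
  simp only [outer_loop]
  have hp : pvHeader ++ aFields ++ [""] ≠ [] := by simp [pvHeader]
  rw [show pvHeader ++ aFields ++ [""] ++ (PySem.List.pyRange 0 count 1).flatMap cardLines
      = (pvHeader ++ aFields ++ [""]) ++ (PySem.List.pyRange 0 count 1).flatMap cardLines from by
        simp [List.append_assoc],
    main_split _ _ hp]
  have hh : PySem.Str.join "\n" (pvHeader ++ aFields ++ [""]) = bHead := by
    simp [bHead, aFields, bFields]
  rw [hh]
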